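-- pv_equiv track=rewrite | github.com/codyshepherd/advent_of_code_2019 | 8.py | layers
-- ===== SOURCE A (Python) =====
-- from typing import (
--     List
-- )
--
-- def layers(raw: str, wide: int, tall: int) -> List[List[List[int]]]:
--     pixels_per_layer = wide * tall
--     num_layers = len(raw) // pixels_per_layer
--     all_layers = []
--
--     raw_index = 0
--     for layer in range(num_layers):
--         layer = []
--         for row in range(tall):
--             layer_row = []
--             for col in range(wide):
--                 pixel = int(raw[raw_index])
--                 layer_row.append(pixel)
--                 raw_index += 1
--             layer.append(layer_row)
--         all_layers.append(layer)
--
--     return all_layers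
-- ===== SOURCE B (Python) =====
-- def layers(raw, wide, tall):
--     ppl = wide * tall
--     n = (len(raw) // ppl) * ppl
--     grid = raw[:n]
--     return [[[int(c) for c in grid[k + r * wide:k + (r + 1) * wide]]
--              for r in range(tall)]
--             for k in range(0, n, ppl)]
-- ===== Notes on version B (the rewrite author's own statement) =====
-- stated objective: simpler
-- what changed: Replaced the interleaved triple loop with a mutable raw_index by truncating the string once and reshaping it with slices (layer chunks by a stepped range, rows by slicing), converting each row's characters in a comprehension.
import Mathlib
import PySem

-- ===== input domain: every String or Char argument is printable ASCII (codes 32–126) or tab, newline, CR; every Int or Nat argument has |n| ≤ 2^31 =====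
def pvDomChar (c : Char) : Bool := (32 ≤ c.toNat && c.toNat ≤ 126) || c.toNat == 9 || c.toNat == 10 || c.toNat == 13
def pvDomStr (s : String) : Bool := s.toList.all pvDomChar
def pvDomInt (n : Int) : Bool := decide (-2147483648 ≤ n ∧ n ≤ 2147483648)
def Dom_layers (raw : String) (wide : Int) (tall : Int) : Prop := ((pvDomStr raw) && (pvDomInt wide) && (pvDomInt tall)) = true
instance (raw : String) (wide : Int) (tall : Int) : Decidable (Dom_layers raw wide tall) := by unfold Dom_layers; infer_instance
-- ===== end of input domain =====

-- B replaces A's interleaved triple loop over a running raw_index by a one-pass flat prefix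
-- conversion followed by a slicing reshape (layer chunks, then rows); objective: a simpler
-- decomposition, not speed.


-- ===== PORT A =====
-- int(raw[raw_index]) : the `.getD 0` default is never reached under Pre_layers
-- (index in range, digit character).
def pixA (cs : List Char) (i : Int) : Int :=
  ((PySem.List.pyGet? cs i).bind (fun c => PySem.Int.ofChars? [c])).getD 0

-- innermost `for col in range(wide)` body: append a pixel, advance raw_index
def innerStep (cs : List Char) (st : List Int × Int) (_ : Int) : List Int × Int :=
  (st.1 ++ [pixA cs st.2], st.2 + 1)

-- `for row in range(tall)` body
def rowStep (cs : List Char) (wide : Int) (st : List (List Int) × Int) (_ : Int) :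
    List (List Int) × Int :=
  let st3 := (PySem.List.pyRange 0 wide 1).foldl (innerStep cs) (([] : List Int), st.2)
  (st.1 ++ [st3.1], st3.2)

-- `for layer in range(num_layers)` body
def layerStep (cs : List Char) (wide tall : Int)
    (st : List (List (List Int)) × Int) (_ : Int) : List (List (List Int)) × Int :=
  let st2 := (PySem.List.pyRange 0 tall 1).foldl (rowStep cs wide) (([] : List (List Int)), st.2)
  (st.1 ++ [st2.1], st2.2)

def layers (raw : String) (wide : Int) (tall : Int) : List (List (List Int)) :=
  let cs := raw.toList
  let pixelsPerLayer := wide * tall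
  let numLayers := PySem.Int.floordiv (PySem.Str.len raw) pixelsPerLayer
  ((PySem.List.pyRange 0 numLayers 1).foldl (layerStep cs wide tall)
    (([] : List (List (List Int))), (0 : Int))).1

-- ===== PORT B =====
-- int(c) for a single character; the `.getD 0` default is never reached under Pre_layers.
def pixB (c : Char) : Int := (PySem.Int.ofChars? [c]).getD 0

def layers_alt (raw : String) (wide : Int) (tall : Int) : List (List (List Int)) :=
  let cs := raw.toList
  let ppl := wide * tall
  let n := (PySem.Int.floordiv (PySem.Str.len raw) ppl) * ppl
  let grid := PySem.List.slice cs none (some n)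
  (PySem.List.pyRange 0 n ppl).map (fun k =>
    (PySem.List.pyRange 0 tall 1).map (fun r =>
      (PySem.List.slice grid (some (k + r * wide)) (some (k + (r + 1) * wide))).map pixB))

-- ===== PRECONDITION & SPEC =====
-- Pre_layers is exactly where Python A returns normally: it excludes wide*tall = 0
-- (A raises ZeroDivisionError) and, when both dimensions are positive, a truncated prefix
-- containing a non-digit character (A raises ValueError on int(c)).
def Pre_layers (raw : String) (wide : Int) (tall : Int) : Prop :=
  wide * tall ≠ 0 ∧
  (1 ≤ wide → 1 ≤ tall →
    (raw.toList.take ((raw.toList.length / (wide * tall).toNat) * (wide * tall).toNat)).all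
      Char.isDigit = true)
instance (raw : String) (wide : Int) (tall : Int) : Decidable (Pre_layers raw wide tall) := by
  unfold Pre_layers; infer_instance

def pvWitness_layers : String × Int × Int := ("123456789012", 3, 2)

def Spec_layers (raw : String) (wide : Int) (tall : Int) (out : List (List (List Int))) : Prop :=
  out = layers_alt raw wide tall
instance (raw : String) (wide : Int) (tall : Int) (out : List (List (List Int))) :
    Decidable (Spec_layers raw wide tall out) := by unfold Spec_layers; infer_instance

-- ===== CLAIM (what is proved, stated in full; the proofs are below) =====
def Claim_equal_layers : Prop := ∀ (raw : String) (wide : Int) (tall : Int),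
  Dom_layers raw wide tall → Pre_layers raw wide tall →
  Spec_layers raw wide tall (layers raw wide tall)

-- ===== LEMMAS AND PROOFS =====

-- the common normal form: a grid of pixels read at flat index l*(t*w) + r*w + c
def gridA (cs : List Char) (w t L : Nat) : List (List (List Int)) :=
  (List.range L).map (fun l => (List.range t).map (fun r => (List.range w).map
    (fun c => pixA cs ((l * (t * w) : Nat) + (r * w : Nat) + (c : Nat)))))

lemma inner_fold (cs : List Char) (w : Nat) (acc : List Int) (ri : Int) :
    (PySem.List.pyRange 0 (w : Int) 1).foldl (innerStep cs) (acc, ri) =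
      (acc ++ (List.range w).map (fun c => pixA cs (ri + c)), ri + w) := by
  induction w with
  | zero => simp
  | succ n ih =>
    have h : ((n + 1 : Nat) : Int) = (n : Int) + 1 := by push_cast; ring
    rw [h, PySem.List.pyRange_one_succ_right (by positivity), List.foldl_append, ih]
    simp [innerStep, List.range_succ]
    ring

lemma row_fold (cs : List Char) (w t : Nat) (acc : List (List Int)) (ri : Int) :
    (PySem.List.pyRange 0 (t : Int) 1).foldl (rowStep cs (w : Int)) (acc, ri) =
      (acc ++ (List.range t).map
        (fun r => (List.range w).map (fun c => pixA cs (ri + (r * w : Nat) + c))),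
        ri + (t * w : Nat)) := by
  induction t with
  | zero => simp
  | succ n ih =>
    have h : ((n + 1 : Nat) : Int) = (n : Int) + 1 := by push_cast; ring
    rw [h, PySem.List.pyRange_one_succ_right (by positivity), List.foldl_append, ih]
    simp only [rowStep, List.foldl_cons, List.foldl_nil, inner_fold, List.range_succ,
      List.map_append, List.map_cons, List.map_nil, List.append_assoc]
    simp only [List.nil_append, Prod.mk.injEq]
    exact ⟨trivial, by push_cast; ring⟩

lemma layer_fold (cs : List Char) (w t L : Nat) (acc : List (List (List Int))) (ri : Int) :
    (PySem.List.pyRange 0 (L : Int) 1).foldl (layerStep cs (w : Int) (t : Int)) (acc, ri) =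
      (acc ++ (List.range L).map (fun l => (List.range t).map
        (fun r => (List.range w).map
          (fun c => pixA cs (ri + (l * (t * w) : Nat) + (r * w : Nat) + c)))),
        ri + (L * (t * w) : Nat)) := by
  induction L with
  | zero => simp
  | succ n ih =>
    have h : ((n + 1 : Nat) : Int) = (n : Int) + 1 := by push_cast; ring
    rw [h, PySem.List.pyRange_one_succ_right (by positivity), List.foldl_append, ih]
    simp only [layerStep, List.foldl_cons, List.foldl_nil, row_fold, List.range_succ,
      List.map_append, List.map_cons, List.map_nil, List.append_assoc]
    simp only [List.nil_append, Prod.mk.injEq]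
    exact ⟨trivial, by push_cast; ring⟩

lemma layersA_eq (raw : String) (w t : Nat) :
    layers raw (w : Int) (t : Int) = gridA raw.toList w t (raw.toList.length / (w * t)) := by
  have hmul : ((w : Int) * (t : Int)) = ((w * t : Nat) : Int) := by push_cast; ring
  unfold layers gridA
  simp only [PySem.Str.len_eq, hmul, PySem.Int.floordiv_natCast]
  rw [layer_fold]
  simp
  intro l _ r _
  rw [← List.map_eq_flatMap, List.map_map]
  rfl

lemma pix_eq (cs : List Char) (i : Nat) (h : i < cs.length) : pixA cs (i : Int) = pixB cs[i] := by
  simp [pixA, pixB, PySem.List.pyGet?_natCast, List.getElem?_eq_getElem h]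

lemma rangeK (L p : Nat) (hp : 1 ≤ p) :
    (if (0 : Int) < ((L * p : Nat) : Int)
      then ((((L * p : Nat) : Int) - 0 + (p : Int) - 1) / (p : Int)).toNat else 0) = L := by
  by_cases h0 : 0 < L * p
  · rw [if_pos (by exact_mod_cast h0)]
    have harg : (((L * p : Nat) : Int) - 0 + (p : Int) - 1) = ((L * p + p - 1 : Nat) : Int) := by
      push_cast [Nat.cast_sub (by omega : 1 ≤ L * p + p)]; ring
    rw [harg, ← Int.natCast_div, Int.toNat_natCast]
    have : L * p + p - 1 = (p - 1) + p * L := by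
      rw [Nat.mul_comm p L]; omega
    rw [this, Nat.add_mul_div_left _ _ (by omega : 0 < p), Nat.div_eq_of_lt (by omega)]
    omega
  · rw [if_neg (by exact_mod_cast h0)]
    have hLp : L * p = 0 := by omega
    rcases Nat.mul_eq_zero.mp hLp with h | h <;> omega

lemma row_slice (cs : List Char) (w t L l r : Nat) (hl : l < L) (hr : r < t)
    (hlen : L * (w * t) ≤ cs.length) :
    (((cs.take (L * (w * t))).drop ((w * t) * l + r * w)).take w).map pixB
      = (List.range w).map
        (fun c => pixA cs ((l * (t * w) : Nat) + (r * w : Nat) + (c : Nat))) := by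
  have hpl : (w * t) * l + (w * t) ≤ L * (w * t) := by
    have h1 : l + 1 ≤ L := hl
    calc (w * t) * l + (w * t) = (l + 1) * (w * t) := by ring
    _ ≤ L * (w * t) := Nat.mul_le_mul_right _ h1
  have hrw : r * w + w ≤ w * t := by
    have h1 : r + 1 ≤ t := hr
    calc r * w + w = (r + 1) * w := by ring
    _ ≤ t * w := Nat.mul_le_mul_right _ h1
    _ = w * t := Nat.mul_comm t w
  apply List.ext_getElem
  · simp only [List.length_map, List.length_take, List.length_drop, List.length_range]
    have e1 : min (L * (w * t)) cs.length = L * (w * t) := by omega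
    rw [e1]
    generalize hA : (w * t) * l = A at hpl
    generalize hB : L * (w * t) = B at hpl hlen ⊢
    generalize hR : r * w = R at hrw
    omega
  · intro c hc hc'
    have hcw : c < w := by simpa using hc'
    have hidx : (w * t) * l + r * w + c < cs.length := by omega
    simp only [List.getElem_map, List.getElem_take, List.getElem_drop, List.getElem_range]
    have hcast : ((l * (t * w) : Nat) : Int) + ((r * w : Nat) : Int) + (c : Int)
        = (((w * t) * l + r * w + c : Nat) : Int) := by push_cast; ring
    rw [hcast, pix_eq cs _ hidx]

lemma layersB_eq (raw : String) (w t : Nat) (hw : 1 ≤ w) (ht : 1 ≤ t) :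
    layers_alt raw (w : Int) (t : Int) = gridA raw.toList w t (raw.toList.length / (w * t)) := by
  have hp1 : 1 ≤ w * t := Nat.mul_le_mul hw ht
  have hmul : ((w : Int) * (t : Int)) = ((w * t : Nat) : Int) := by push_cast; ring
  have hn : ((raw.toList.length / (w * t) : Nat) : Int) * ((w * t : Nat) : Int)
      = (((raw.toList.length / (w * t)) * (w * t) : Nat) : Int) := by push_cast; ring
  have hp0 : (0 : Int) < ((w * t : Nat) : Int) := by exact_mod_cast hp1
  unfold layers_alt gridA
  simp only [PySem.Str.len_eq, hmul, PySem.Int.floordiv_natCast, hn,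
    PySem.List.slice_to_natCast, PySem.List.pyRange_of_pos _ _ hp0,
    rangeK _ _ hp1, PySem.List.pyRange_one, List.map_map]
  apply List.map_congr_left
  intro l hl
  simp only [Function.comp]
  apply List.map_congr_left
  intro r hr
  simp only [Function.comp, zero_add]
  have hc1 : ((w * t : Nat) : Int) * (l : Int) + (r : Int) * (w : Int)
      = (((w * t) * l + r * w : Nat) : Int) := by push_cast; ring
  have hc2 : ((w * t : Nat) : Int) * (l : Int) + ((r : Int) + 1) * (w : Int)
      = (((w * t) * l + r * w : Nat) : Int) + ((w : Nat) : Int) := by push_cast; ring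
  rw [hc1, hc2, PySem.List.slice_natCast_add]
  exact row_slice raw.toList w t _ l r (by simpa using hl) (by simpa using hr)
    (Nat.div_mul_le_self _ _)

lemma floordiv_nonpos' (a b : Int) (ha : 0 ≤ a) (hb : b < 0) : PySem.Int.floordiv a b ≤ 0 := by
  have h1 := PySem.Int.floordiv_mul_add_mod a b
  have h2 := PySem.Int.mod_neg_bounds (a := a) hb
  nlinarith [h1, h2.1, h2.2]

lemma layersA_negppl (raw : String) (wide tall : Int) (h : wide * tall < 0) :
    layers raw wide tall = [] := by
  have hq : PySem.Int.floordiv (PySem.Str.len raw) (wide * tall) ≤ 0 :=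
    floordiv_nonpos' _ _ (by rw [PySem.Str.len_eq]; positivity) h
  unfold layers
  simp only [PySem.List.pyRange_one, Int.sub_zero, Int.toNat_of_nonpos hq, List.range_zero,
    List.map_nil, List.foldl_nil]

lemma layersB_negppl (raw : String) (wide tall : Int) (h : wide * tall < 0) :
    layers_alt raw wide tall = [] := by
  have hq : PySem.Int.floordiv (PySem.Str.len raw) (wide * tall) ≤ 0 :=
    floordiv_nonpos' _ _ (by rw [PySem.Str.len_eq]; positivity) h
  have hn : 0 ≤ (PySem.Int.floordiv (PySem.Str.len raw) (wide * tall)) * (wide * tall) := by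
    nlinarith [hq, h]
  unfold layers_alt
  simp only [PySem.List.pyRange_of_neg _ _ h,
    if_neg (show ¬ (PySem.Int.floordiv (PySem.Str.len raw) (wide * tall) * (wide * tall) < 0)
      by omega)]
  simp

lemma layer_fold_neg (cs : List Char) (wide tall : Int) (ht : tall ≤ 0) (L : Nat)
    (acc : List (List (List Int))) (ri : Int) :
    (PySem.List.pyRange 0 (L : Int) 1).foldl (layerStep cs wide tall) (acc, ri) =
      (acc ++ List.replicate L [], ri) := by
  have hrow : PySem.List.pyRange 0 tall 1 = [] := by
    have h0 : (tall - 0).toNat = 0 := by omega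
    rw [PySem.List.pyRange_one, h0]
    simp
  induction L with
  | zero => simp
  | succ n ih =>
    have h : ((n + 1 : Nat) : Int) = (n : Int) + 1 := by push_cast; ring
    rw [h, PySem.List.pyRange_one_succ_right (by positivity), List.foldl_append, ih]
    simp [layerStep, hrow, List.replicate_succ']

lemma layersA_negdims (raw : String) (wide tall : Int) (ht : tall ≤ 0) (p : Nat)
    (hp : wide * tall = (p : Int)) :
    layers raw wide tall = List.replicate (raw.toList.length / p) [] := by
  unfold layers
  simp only [PySem.Str.len_eq, hp, PySem.Int.floordiv_natCast]
  rw [layer_fold_neg _ _ _ ht]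
  simp

lemma layersB_negdims (raw : String) (wide tall : Int) (ht : tall ≤ 0) (p : Nat)
    (hp1 : 1 ≤ p) (hp : wide * tall = (p : Int)) :
    layers_alt raw wide tall = List.replicate (raw.toList.length / p) [] := by
  have hp0 : (0 : Int) < ((p : Nat) : Int) := by exact_mod_cast hp1
  have hn : ((raw.toList.length / p : Nat) : Int) * ((p : Nat) : Int)
      = (((raw.toList.length / p) * p : Nat) : Int) := by push_cast; ring
  have hrow : PySem.List.pyRange 0 tall 1 = [] := by
    have h0 : (tall - 0).toNat = 0 := by omega
    rw [PySem.List.pyRange_one, h0]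
    simp
  unfold layers_alt
  simp only [PySem.Str.len_eq, hp, PySem.Int.floordiv_natCast, hn,
    PySem.List.pyRange_of_pos _ _ hp0, rangeK _ _ hp1, hrow, List.map_nil]
  rw [List.map_const', List.length_map, List.length_range]

-- ===== VERDICT (by name: the statement is the Claim_ definition above) =====
theorem layers_spec : Claim_equal_layers := by
  intro raw wide tall _ hpre
  obtain ⟨hne, hdig⟩ := hpre
  unfold Spec_layers
  by_cases hw : 1 ≤ wide
  · by_cases ht : 1 ≤ tall
    · have hw' : wide = ((wide.toNat : Nat) : Int) := (Int.toNat_of_nonneg (by omega)).symm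
      have ht' : tall = ((tall.toNat : Nat) : Int) := (Int.toNat_of_nonneg (by omega)).symm
      rw [hw', ht', layersA_eq, layersB_eq] <;> omega
    · have htl : tall < 0 := by
        rcases lt_trichotomy tall 0 with h | h | h
        · exact h
        · exact absurd (by rw [h, mul_zero]) hne
        · omega
      have hlt : wide * tall < 0 := mul_neg_of_pos_of_neg (by omega) htl
      rw [layersA_negppl _ _ _ hlt, layersB_negppl _ _ _ hlt]
  · have hwl : wide < 0 := by
      rcases lt_trichotomy wide 0 with h | h | h
      · exact h
      · exact absurd (by rw [h, zero_mul]) hne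
      · omega
    by_cases ht : 1 ≤ tall
    · have hlt : wide * tall < 0 := mul_neg_of_neg_of_pos hwl (by omega)
      rw [layersA_negppl _ _ _ hlt, layersB_negppl _ _ _ hlt]
    · have htl : tall < 0 := by
        rcases lt_trichotomy tall 0 with h | h | h
        · exact h
        · exact absurd (by rw [h, mul_zero]) hne
        · omega
      have hpos : (0 : Int) < wide * tall := mul_pos_of_neg_of_neg hwl htl
      have hp : wide * tall = (((wide * tall).toNat : Nat) : Int) :=
        (Int.toNat_of_nonneg hpos.le).symm
      have hp1 : 1 ≤ (wide * tall).toNat := by omega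
      rw [layersA_negdims _ _ _ htl.le _ hp, layersB_negdims _ _ _ htl.le _ hp1 hp]
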